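-- pv_equiv track=rewrite | github.com/ElliottSax/engineer | training_iterations/training_iteration118.py | nimber_mult
-- ===== SOURCE A (Python) =====
-- def nimber_mult(a, b):
--     """Multiply nimbers (used in composite games)."""
--     if a == 0 or b == 0:
--         return 0
--     if a == 1:
--         return b
--     if b == 1:
--         return a
--
--     # Find highest power of 2 in a
--     def highest_bit(x):
--         bit = 0
--         while (1 << bit) <= x:
--             bit += 1
--         return bit - 1
--
--     ha = highest_bit(a)
--     hb = highest_bit(b)
--
--     # If a is a power of 2
--     if a == (1 << ha):
--         if b == (1 << hb):
--             # Both powers of 2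
--             if ha & hb:
--                 # Same bit set, use special case
--                 d = 1 << (ha - 1)
--                 return nimber_mult(d, d) ^ nimber_mult(d, b)
--             else:
--                 return a * b
--         else:
--             # Split b
--             lb = 1 << hb
--             return nimber_mult(a, lb) ^ nimber_mult(a, b ^ lb)
--     else:
--         # Split a
--         la = 1 << ha
--         return nimber_mult(la, b) ^ nimber_mult(a ^ la, b)
-- ===== SOURCE B (Python) =====
-- def nimber_mult(a, b):
--     """Multiply nimbers (used in composite games)."""
--     memo = {}
--
--     def go(a, b):
--         if a == 0 or b == 0:
--             return 0
--         if a == 1: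
--             return b
--         if b == 1:
--             return a
--         cached = memo.get((a, b))
--         if cached is not None:
--             return cached
--         ha = a.bit_length() - 1
--         hb = b.bit_length() - 1
--         if a == (1 << ha):
--             if b == (1 << hb):
--                 if ha & hb:
--                     d = 1 << (ha - 1)
--                     res = go(d, d) ^ go(d, b)
--                 else:
--                     res = a * b
--             else:
--                 lb = 1 << hb
--                 res = go(a, lb) ^ go(a, b ^ lb)
--         else:
--             la = 1 << ha
--             res = go(la, b) ^ go(a ^ la, b)
--         memo[(a, b)] = res
--         return res
--
--     return go(a, b)
-- ===== Notes on version B (the rewrite author's own statement) =====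
-- stated objective: faster
-- what changed: B memoizes the recursion in a dict keyed by (a,b) so each subproblem is computed once (and replaces the hand-written highest-bit while-loop by int.bit_length), turning A's exponentially branching recursion into a DP over the polynomially many distinct subproblems.
import Mathlib
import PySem

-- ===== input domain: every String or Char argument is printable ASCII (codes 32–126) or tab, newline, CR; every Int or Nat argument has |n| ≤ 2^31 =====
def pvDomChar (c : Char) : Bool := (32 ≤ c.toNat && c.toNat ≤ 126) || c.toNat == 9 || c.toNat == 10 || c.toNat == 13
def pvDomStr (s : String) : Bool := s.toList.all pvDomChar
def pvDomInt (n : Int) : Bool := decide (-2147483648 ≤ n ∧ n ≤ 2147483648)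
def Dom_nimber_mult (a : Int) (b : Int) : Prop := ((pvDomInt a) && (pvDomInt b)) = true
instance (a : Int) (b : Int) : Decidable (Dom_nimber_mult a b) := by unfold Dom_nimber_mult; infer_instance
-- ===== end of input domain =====

-- B memoizes A's recursion (a dict over (a,b) subproblems, int.bit_length instead of the
-- while-loop), measured asymptotically faster in a timing run; equal results proved on Pre_.
-- Both ports carry a fuel argument (a + b + 1, strictly above the recursion measure a + b) purely
-- as a totality guard; the fuel-exhausted branch is never reached from the wrappers.

-- ===== PORT A =====

-- the inner 'while (1 << bit) <= x: bit += 1' loop of highest_bit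
def hbLoop (x : Nat) (bit : Nat) : Nat :=
  if 2 ^ bit ≤ x then hbLoop x (bit + 1) else bit
termination_by x + 1 - bit
decreasing_by
  have : bit < 2 ^ bit := Nat.lt_two_pow_self
  omega

-- highest_bit(x) = (loop result) - 1; only evaluated on x ≥ 2 in the recursion (Nat sub is exact there)
def hbN (x : Nat) : Nat := hbLoop x 0 - 1

-- the recursive body of A on Nat (ha := hbN a, hb := hbN b and the 1 << … values inlined);
-- the Int wrapper below handles the signed early returns
def nimA : Nat → Nat → Nat → Nat
  | 0, _, _ => 0        -- fuel exhausted: unreachable from the wrapper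
  | fuel + 1, a, b =>
    if a = 0 ∨ b = 0 then 0
    else if a = 1 then b
    else if b = 1 then a
    else
      if a = 2 ^ hbN a then
        if b = 2 ^ hbN b then
          if hbN a &&& hbN b ≠ 0 then
            nimA fuel (2 ^ (hbN a - 1)) (2 ^ (hbN a - 1)) ^^^ nimA fuel (2 ^ (hbN a - 1)) b
          else a * b
        else
          nimA fuel a (2 ^ hbN b) ^^^ nimA fuel a (b ^^^ 2 ^ hbN b)
      else
        nimA fuel (2 ^ hbN a) b ^^^ nimA fuel (a ^^^ 2 ^ hbN a) b

def nimber_mult (a : Int) (b : Int) : Int :=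
  if a = 0 ∨ b = 0 then 0
  else if a = 1 then b
  else if b = 1 then a
  else if a < 2 ∨ b < 2 then 0   -- totality guard: here Python's highest_bit yields -1 and A raises ValueError (outside Pre_)
  else (nimA (a.toNat + b.toNat + 1) a.toNat b.toNat : Int)

-- ===== PORT B =====

-- B's inner 'go' with the memo dict threaded through; ha/hb via int.bit_length (PySem.Int.bitLength)
def nimBgo : Nat → PySem.Dict (Nat × Nat) Nat → Nat → Nat → PySem.Dict (Nat × Nat) Nat × Nat
  | 0, m, _, _ => (m, 0)     -- fuel exhausted: unreachable from the wrapper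
  | fuel + 1, m, a, b =>
    if a = 0 ∨ b = 0 then (m, 0)
    else if a = 1 then (m, b)
    else if b = 1 then (m, a)
    else
      match m.get? (a, b) with
      | some v => (m, v)
      | none =>
        -- ha := a.bit_length()-1, hb := b.bit_length()-1, d/lb/la = 1 << … (inlined)
        if a = 2 ^ (PySem.Int.bitLength (a : Int) - 1) then
          if b = 2 ^ (PySem.Int.bitLength (b : Int) - 1) then
            if (PySem.Int.bitLength (a : Int) - 1) &&& (PySem.Int.bitLength (b : Int) - 1) ≠ 0 then
              let p1 := nimBgo fuel m (2 ^ (PySem.Int.bitLength (a : Int) - 1 - 1)) (2 ^ (PySem.Int.bitLength (a : Int) - 1 - 1))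
              let p2 := nimBgo fuel p1.1 (2 ^ (PySem.Int.bitLength (a : Int) - 1 - 1)) b
              (p2.1.insert (a, b) (p1.2 ^^^ p2.2), p1.2 ^^^ p2.2)
            else (m.insert (a, b) (a * b), a * b)
          else
            let p1 := nimBgo fuel m a (2 ^ (PySem.Int.bitLength (b : Int) - 1))
            let p2 := nimBgo fuel p1.1 a (b ^^^ 2 ^ (PySem.Int.bitLength (b : Int) - 1))
            (p2.1.insert (a, b) (p1.2 ^^^ p2.2), p1.2 ^^^ p2.2)
        else
          let p1 := nimBgo fuel m (2 ^ (PySem.Int.bitLength (a : Int) - 1)) b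
          let p2 := nimBgo fuel p1.1 (a ^^^ 2 ^ (PySem.Int.bitLength (a : Int) - 1)) b
          (p2.1.insert (a, b) (p1.2 ^^^ p2.2), p1.2 ^^^ p2.2)

def nimber_mult_alt (a : Int) (b : Int) : Int :=
  if a = 0 ∨ b = 0 then 0
  else if a = 1 then b
  else if b = 1 then a
  else if a < 2 ∨ b < 2 then 0   -- totality guard: here Python raises (outside Pre_)
  else ((nimBgo (a.toNat + b.toNat + 1) PySem.Dict.empty a.toNat b.toNat).2 : Int)

-- ===== PRECONDITION & SPEC =====
-- A raises ValueError when a negative argument reaches highest_bit (1 << -1); it still returns when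
-- either argument is 0 or 1, so exactly those signed corners stay inside Pre_.
def Pre_nimber_mult (a : Int) (b : Int) : Prop :=
  a = 0 ∨ b = 0 ∨ a = 1 ∨ b = 1 ∨ (2 ≤ a ∧ 2 ≤ b)
instance (a : Int) (b : Int) : Decidable (Pre_nimber_mult a b) := by unfold Pre_nimber_mult; infer_instance
def pvWitness_nimber_mult : Int × Int := (6, 7)

def Spec_nimber_mult (a : Int) (b : Int) (out : Int) : Prop := out = nimber_mult_alt a b
instance (a : Int) (b : Int) (out : Int) : Decidable (Spec_nimber_mult a b out) := by unfold Spec_nimber_mult; infer_instance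

-- ===== CLAIM (what is proved, stated in full; the proofs are below) =====
def Claim_equal_nimber_mult : Prop := ∀ (a : Int) (b : Int), Dom_nimber_mult a b → Pre_nimber_mult a b → Spec_nimber_mult a b (nimber_mult a b)

-- ===== LEMMAS AND PROOFS =====

theorem hbLoop_gt (x bit : Nat) : x < 2 ^ hbLoop x bit := by
  fun_induction hbLoop x bit with
  | case1 b h ih => exact ih
  | case2 b h => omega

theorem hbLoop_spec (x bit : Nat) (h : 2 ^ bit ≤ x) :
    bit < hbLoop x bit ∧ 2 ^ (hbLoop x bit - 1) ≤ x := by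
  fun_induction hbLoop x bit with
  | case1 b h' ih =>
    by_cases h2 : 2 ^ (b + 1) ≤ x
    · obtain ⟨i1, i2⟩ := ih h2
      exact ⟨by omega, i2⟩
    · have he : hbLoop x (b + 1) = b + 1 := by rw [hbLoop.eq_1, if_neg h2]
      rw [he]
      exact ⟨by omega, by simpa using h'⟩
  | case2 b h' => omega

theorem hbN_le {x : Nat} (h : 1 ≤ x) : 2 ^ hbN x ≤ x := by
  have := hbLoop_spec x 0 (by simpa using h)
  simpa [hbN] using this.2

theorem hbN_lt {x : Nat} (h : 1 ≤ x) : x < 2 ^ (hbN x + 1) := by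
  have h1 := (hbLoop_spec x 0 (by simpa using h)).1
  have h2 := hbLoop_gt x 0
  have he : hbN x + 1 = hbLoop x 0 := by unfold hbN; omega
  rw [he]
  exact h2

-- clearing the top bit strictly shrinks a number (the recursion measure drops)
theorem xor_msb_lt {x h : Nat} (h1 : 2 ^ h ≤ x) (h2 : x < 2 ^ (h + 1)) :
    x ^^^ 2 ^ h < 2 ^ h := by
  have hbit : x.testBit h = true := by
    have hd : x / 2 ^ h = 1 := by
      apply Nat.div_eq_of_lt_le (by simpa using h1)
      have he : (1 + 1) * 2 ^ h = 2 ^ (h + 1) := by ring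
      omega
    simp [Nat.testBit, Nat.shiftRight_eq_div_pow, hd]
  apply Nat.lt_of_testBit h
  · simp [Nat.testBit_xor, hbit]
  · simp
  · intro j hj
    have hxj : x.testBit j = false :=
      Nat.testBit_lt_two_pow (lt_of_lt_of_le h2 (Nat.pow_le_pow_right (by omega) hj))
    have hne : ¬ h = j := by omega
    simp [Nat.testBit_xor, hxj, hne]

-- bit_length brackets its argument between consecutive powers of two
theorem bitLength_bracket {x : Nat} (h : 1 ≤ x) :
    2 ^ (PySem.Int.bitLength (x : Int) - 1) ≤ x ∧
      x < 2 ^ (PySem.Int.bitLength (x : Int) - 1 + 1) := by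
  have hx0 : (x : Int) ≠ 0 := by omega
  have hle := PySem.Int.two_pow_bitLength_le (x : Int) hx0
  have hlt := PySem.Int.lt_two_pow_bitLength (x : Int)
  rw [Int.natAbs_natCast] at hle hlt
  have hL : 1 ≤ PySem.Int.bitLength (x : Int) := by
    by_contra hc
    have h0 : PySem.Int.bitLength (x : Int) = 0 := by omega
    rw [h0] at hlt
    simp at hlt
    omega
  have hcan : PySem.Int.bitLength (x : Int) - 1 + 1 = PySem.Int.bitLength (x : Int) := by omega
  rw [hcan]
  exact ⟨hle, hlt⟩

-- B's int.bit_length() - 1 agrees with A's highest_bit loop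
theorem bitLen_sub_one_eq_hbN {x : Nat} (h : 1 ≤ x) :
    PySem.Int.bitLength (x : Int) - 1 = hbN x := by
  obtain ⟨hle, hlt⟩ := bitLength_bracket (x := x) h
  have h1 := hbN_le h
  have h2 := hbN_lt h
  -- both bitLength-1 and hbN x satisfy 2^h ≤ x < 2^(h+1); the bracket is unique
  rcases Nat.lt_trichotomy (PySem.Int.bitLength (x : Int) - 1) (hbN x) with hc | hc | hc
  · have hmono := Nat.pow_le_pow_right (n := 2) (by omega)
      (show PySem.Int.bitLength (x : Int) - 1 + 1 ≤ hbN x by omega)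
    omega
  · exact hc
  · have hmono := Nat.pow_le_pow_right (n := 2) (by omega)
      (show hbN x + 1 ≤ PySem.Int.bitLength (x : Int) - 1 by omega)
    omega

-- a memo is correct when every stored value is the corresponding fully-fuelled nimA value
def memoOK (m : PySem.Dict (Nat × Nat) Nat) : Prop :=
  ∀ k v, m.get? k = some v → ∀ fuel, k.1 + k.2 < fuel → v = nimA fuel k.1 k.2

theorem memoOK_empty : memoOK PySem.Dict.empty := by
  intro k v h
  simp [PySem.Dict.get?_empty] at h

-- fully-fuelled nimA does not depend on the exact fuel
theorem nimA_fuel_irrel : ∀ (f g a b : Nat), a + b < f → a + b < g → nimA f a b = nimA g a b := by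
  intro f
  induction f with
  | zero => intro g a b hf; omega
  | succ f ihf =>
    intro g a b hf hg
    cases g with
    | zero => omega
    | succ g =>
      rw [nimA, nimA]
      by_cases h0 : a = 0 ∨ b = 0
      · simp [h0]
      by_cases h1 : a = 1
      · simp [h1]
      by_cases h2 : b = 1
      · simp [h2]
      simp only [if_neg h0, if_neg h1, if_neg h2]
      have ha2 : 2 ≤ a := by omega
      have hb2 : 2 ≤ b := by omega
      by_cases hpa : a = 2 ^ hbN a
      · by_cases hpb : b = 2 ^ hbN b
        · by_cases hand : hbN a &&& hbN b ≠ 0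
          · simp only [if_pos hpa, if_pos hpb, if_pos hand]
            have hha : hbN a ≠ 0 := fun h => hand (by simp [h])
            have hlt : 2 ^ (hbN a - 1) < 2 ^ hbN a := Nat.pow_lt_pow_right (by omega) (by omega)
            have h2a : 2 ^ (hbN a - 1) + 2 ^ (hbN a - 1) = 2 ^ hbN a := by
              rw [← Nat.two_mul, ← Nat.pow_succ']; congr 1; omega
            rw [ihf g _ _ (by omega) (by omega), ihf g _ _ (by omega) (by omega)]
          · simp only [if_pos hpa, if_pos hpb, if_neg hand]
        · simp only [if_pos hpa, if_neg hpb]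
          have hle := hbN_le (x := b) (by omega)
          have hltb := hbN_lt (x := b) (by omega)
          have hxor := xor_msb_lt (x := b) (h := hbN b) hle hltb
          rw [ihf g _ _ (by omega) (by omega), ihf g _ _ (by omega) (by omega)]
      · simp only [if_neg hpa]
        have hle := hbN_le (x := a) (by omega)
        have hlta := hbN_lt (x := a) (by omega)
        have hxor := xor_msb_lt (x := a) (h := hbN a) hle hlta
        rw [ihf g _ _ (by omega) (by omega), ihf g _ _ (by omega) (by omega)]

theorem memoOK_insert {m : PySem.Dict (Nat × Nat) Nat} (hm : memoOK m)
    {a b r f : Nat} (hf : a + b < f) (hr : r = nimA f a b) : memoOK (m.insert (a, b) r) := by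
  intro k v h fuel hfu
  rw [PySem.Dict.get?_insert] at h
  split at h
  · rename_i hk
    subst hk
    cases h
    rw [hr]
    exact nimA_fuel_irrel f fuel a b hf hfu
  · exact hm k v h fuel hfu

-- main invariant: with a correct memo, go returns nimA's value and keeps the memo correct
theorem nimBgo_spec : ∀ (fuel a b : Nat) (m : PySem.Dict (Nat × Nat) Nat), a + b < fuel → memoOK m →
    (nimBgo fuel m a b).2 = nimA fuel a b ∧ memoOK (nimBgo fuel m a b).1 := by
  intro fuel
  induction fuel with
  | zero => intro a b m hn; omega
  | succ n ih =>
    intro a b m hn hm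
    by_cases h0 : a = 0 ∨ b = 0
    · rw [nimBgo, nimA]; simp [h0, hm]
    have ha0 : ¬ a = 0 := by omega
    have hb0 : ¬ b = 0 := by omega
    by_cases h1 : a = 1
    · rw [nimBgo, nimA]; simp [h1, hb0, hm]
    by_cases h2 : b = 1
    · rw [nimBgo, nimA]; simp [h1, h2, ha0, hm]
    have ha2 : 2 ≤ a := by omega
    have hb2 : 2 ≤ b := by omega
    have hA : PySem.Int.bitLength (a : Int) - 1 = hbN a := bitLen_sub_one_eq_hbN (by omega)
    have hB : PySem.Int.bitLength (b : Int) - 1 = hbN b := bitLen_sub_one_eq_hbN (by omega)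
    have hAeq : nimA (n + 1) a b =
        (if a = 2 ^ hbN a then
          if b = 2 ^ hbN b then
            if hbN a &&& hbN b ≠ 0 then
              nimA n (2 ^ (hbN a - 1)) (2 ^ (hbN a - 1)) ^^^ nimA n (2 ^ (hbN a - 1)) b
            else a * b
          else
            nimA n a (2 ^ hbN b) ^^^ nimA n a (b ^^^ 2 ^ hbN b)
        else
          nimA n (2 ^ hbN a) b ^^^ nimA n (a ^^^ 2 ^ hbN a) b) := by
      rw [nimA]; simp only [if_neg h0, if_neg h1, if_neg h2]
    rw [nimBgo]
    simp only [if_neg h0, if_neg h1, if_neg h2]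
    cases hmem : m.get? (a, b) with
    | some v =>
      exact ⟨hm (a, b) v hmem (n + 1) (by omega), hm⟩
    | none =>
      rw [hA, hB]
      by_cases hpa : a = 2 ^ hbN a
      · by_cases hpb : b = 2 ^ hbN b
        · by_cases hand : hbN a &&& hbN b ≠ 0
          · simp only [if_pos hpa, if_pos hpb, if_pos hand]
            have hha : hbN a ≠ 0 := fun h => hand (by simp [h])
            have hlt : 2 ^ (hbN a - 1) < 2 ^ hbN a := Nat.pow_lt_pow_right (by omega) (by omega)
            have h2a : 2 ^ (hbN a - 1) + 2 ^ (hbN a - 1) = 2 ^ hbN a := by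
              rw [← Nat.two_mul, ← Nat.pow_succ']; congr 1; omega
            obtain ⟨hv1, hm1⟩ := ih (2 ^ (hbN a - 1)) (2 ^ (hbN a - 1)) m (by omega) hm
            obtain ⟨hv2, hm2⟩ := ih (2 ^ (hbN a - 1)) b _ (by omega) hm1
            have hval : nimA (n + 1) a b = nimA n (2 ^ (hbN a - 1)) (2 ^ (hbN a - 1)) ^^^ nimA n (2 ^ (hbN a - 1)) b := by
              rw [hAeq]; simp only [if_pos hpa, if_pos hpb, if_pos hand]
            refine ⟨by simp [hv1, hv2, hval], ?_⟩
            exact memoOK_insert hm2 (f := n + 1) (by omega) (by simp [hv1, hv2, hval])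
          · simp only [if_pos hpa, if_pos hpb, if_neg hand]
            have hval : nimA (n + 1) a b = a * b := by
              rw [hAeq]; simp only [if_pos hpa, if_pos hpb, if_neg hand]
            exact ⟨by simp [hval], memoOK_insert hm (f := n + 1) (by omega) hval.symm⟩
        · simp only [if_pos hpa, if_neg hpb]
          have hle := hbN_le (x := b) (by omega)
          have hltb := hbN_lt (x := b) (by omega)
          have hxor := xor_msb_lt (x := b) (h := hbN b) hle hltb
          obtain ⟨hv1, hm1⟩ := ih a (2 ^ hbN b) m (by omega) hm
          obtain ⟨hv2, hm2⟩ := ih a (b ^^^ 2 ^ hbN b) _ (by omega) hm1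
          have hval : nimA (n + 1) a b = nimA n a (2 ^ hbN b) ^^^ nimA n a (b ^^^ 2 ^ hbN b) := by
            rw [hAeq]; simp only [if_pos hpa, if_neg hpb]
          refine ⟨by simp [hv1, hv2, hval], ?_⟩
          exact memoOK_insert hm2 (f := n + 1) (by omega) (by simp [hv1, hv2, hval])
      · simp only [if_neg hpa]
        have hle := hbN_le (x := a) (by omega)
        have hlta := hbN_lt (x := a) (by omega)
        have hxor := xor_msb_lt (x := a) (h := hbN a) hle hlta
        obtain ⟨hv1, hm1⟩ := ih (2 ^ hbN a) b m (by omega) hm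
        obtain ⟨hv2, hm2⟩ := ih (a ^^^ 2 ^ hbN a) b _ (by omega) hm1
        have hval : nimA (n + 1) a b = nimA n (2 ^ hbN a) b ^^^ nimA n (a ^^^ 2 ^ hbN a) b := by
          rw [hAeq]; simp only [if_neg hpa]
        refine ⟨by simp [hv1, hv2, hval], ?_⟩
        exact memoOK_insert hm2 (f := n + 1) (by omega) (by simp [hv1, hv2, hval])

-- ===== VERDICT (by name: the statement is the Claim_ definition above) =====
theorem nimber_mult_spec : Claim_equal_nimber_mult := by
  unfold Claim_equal_nimber_mult
  intro a b _ hpre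
  unfold Spec_nimber_mult nimber_mult nimber_mult_alt
  by_cases h0 : a = 0 ∨ b = 0
  · simp [h0]
  by_cases h1 : a = 1
  · simp [h1]
  by_cases h2 : b = 1
  · simp [h1, h2]
  have hab : 2 ≤ a ∧ 2 ≤ b := by
    unfold Pre_nimber_mult at hpre
    rcases hpre with h | h | h | h | h <;> first | (exfalso; omega) | exact h
  simp only [if_neg h0, if_neg h1, if_neg h2, if_neg (by omega : ¬(a < 2 ∨ b < 2))]
  have := nimBgo_spec (a.toNat + b.toNat + 1) a.toNat b.toNat PySem.Dict.empty (by omega) memoOK_empty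
  rw [this.1]
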